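-- pv_equiv track=rewrite | github.com/OgreHen/AdventofCode | 2016/day7.py | part_1
-- ===== SOURCE A (Python) =====
-- def splitter(start):
--     should = []
--     shouldnt = []
--     current = ''
--     for letter in start:
--         if letter == '[':
--             if current != '':
--                 should.append(current)
--             current = ''
--         else:
--             current += letter
--         if letter == ']':
--             shouldnt.append(current[:-1])
--             current = ''
--     should.append(current)
--     return should, shouldnt
--
-- def abba_checker(input):
--     for i in range(len(input) - 3):
--         if input[i] == input[i + 3] and input [i + 1] == input[i + 2] and input[i] != input[i + 1]:
--             return True
--     return False
--
-- def part_1(start):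
--     result = 0
--     for item in start:
--         should, shouldnt = splitter(item)
--         should_check = False
--         for item in should:
--             if abba_checker(item):
--                 should_check = True
--         shouldnt_check = False
--         for item in shouldnt:
--             if abba_checker(item):
--                 shouldnt_check = True
--         if should_check and not shouldnt_check:
--             result += 1
--     return result
-- ===== SOURCE B (Python) =====
-- import re
--
-- _SPLIT = re.compile(r'([\[\]])')
--
-- def _abba(s):
--     return any(a == d and b == c and a != b
--                for a, b, c, d in zip(s, s[1:], s[2:], s[3:]))
--
-- def part_1(start):
--     count = 0
--     for line in start:
--         pieces = _SPLIT.split(line)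
--         sup = [p for p, nxt in zip(pieces, pieces[1:]) if nxt == '[' and p] + [pieces[-1]]
--         hyp = [p for p, nxt in zip(pieces, pieces[1:]) if nxt == ']']
--         if any(map(_abba, sup)) and not any(map(_abba, hyp)):
--             count += 1
--     return count
-- ===== Notes on version B (the rewrite author's own statement) =====
-- stated objective: idiomatic
-- what changed: Replaces A's char-by-char state machine (mutable should/shouldnt/current) with a regex bracket split classified by adjacent (piece, delimiter) pairs, and A's index-window loop with a zip/any sliding-window ABBA test.
import Mathlib
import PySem

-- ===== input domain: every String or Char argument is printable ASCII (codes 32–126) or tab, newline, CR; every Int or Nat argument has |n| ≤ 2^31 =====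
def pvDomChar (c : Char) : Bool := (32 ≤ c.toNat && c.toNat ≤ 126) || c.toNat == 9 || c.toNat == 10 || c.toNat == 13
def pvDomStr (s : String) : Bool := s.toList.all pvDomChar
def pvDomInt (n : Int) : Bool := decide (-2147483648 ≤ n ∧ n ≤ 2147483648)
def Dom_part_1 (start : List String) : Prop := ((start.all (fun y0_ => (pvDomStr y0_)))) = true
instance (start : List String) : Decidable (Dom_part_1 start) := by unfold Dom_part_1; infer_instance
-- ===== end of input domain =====

-- B replaces A's char-by-char state machine and index-window scan by a regex-style
-- bracket split classified via adjacent pairs and a zip-window ABBA test (idiomatic).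


-- ===== PORT A =====
-- one step of splitter's for-loop; state = (should, shouldnt, current)
def pvSplitStep (st : List (List Char) × List (List Char) × List Char) (letter : Char) :
    List (List Char) × List (List Char) × List Char :=
  let sh := st.1
  let shn := st.2.1
  let cur := st.2.2
  let p : List (List Char) × List Char :=
    if letter = '[' then ((if cur ≠ [] then sh ++ [cur] else sh), [])
    else (sh, cur ++ [letter])
  if letter = ']' then (p.1, shn ++ [p.2.dropLast], []) else (p.1, shn, p.2)

def splitterA (s : List Char) : List (List Char) × List (List Char) :=
  let r := s.foldl pvSplitStep ([], [], [])
  (r.1 ++ [r.2.2], r.2.1)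

-- abba_checker: for i in range(len(input) - 3): … (early return True = any)
def abbaA (l : List Char) : Bool :=
  (PySem.List.pyRange 0 ((l.length : Int) - 3) 1).any (fun i =>
    (PySem.List.pyGetD l i ' ' == PySem.List.pyGetD l (i + 3) ' ') &&
    (PySem.List.pyGetD l (i + 1) ' ' == PySem.List.pyGetD l (i + 2) ' ') &&
    !(PySem.List.pyGetD l i ' ' == PySem.List.pyGetD l (i + 1) ' '))

def part_1 (start : List String) : Int :=
  start.foldl (fun result item =>
    let ss := splitterA item.toList
    let should_check := ss.1.foldl (fun ok x => if abbaA x then true else ok) false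
    let shouldnt_check := ss.2.foldl (fun ok x => if abbaA x then true else ok) false
    if should_check && !shouldnt_check then result + 1 else result) 0

-- ===== PORT B =====
-- re.split(r'([\[\]])', line): alternating bracket-free segments and single-bracket delimiters
def bsplit : List Char → List (List Char)
  | [] => [[]]
  | c :: l =>
    if c = '[' ∨ c = ']' then [] :: [c] :: bsplit l
    else
      match bsplit l with
      | s :: rest => (c :: s) :: rest
      | [] => [[c]]

-- any(a == d and b == c and a != b for a, b, c, d in zip(s, s[1:], s[2:], s[3:]))
def abbaB (s : List Char) : Bool :=
  ((s.zip (s.drop 1)).zip ((s.drop 2).zip (s.drop 3))).any (fun p =>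
    (p.1.1 == p.2.2) && (p.1.2 == p.2.1) && !(p.1.1 == p.1.2))

-- [p for p, nxt in zip(pieces, pieces[1:]) if nxt == '[' and p] + [pieces[-1]]
def clsSup (pieces : List (List Char)) : List (List Char) :=
  ((pieces.zip pieces.tail).filter (fun pd => pd.2 == ['['] && !(pd.1 == ([] : List Char)))).map Prod.fst
    ++ [PySem.List.pyGetD pieces (-1) []]

-- [p for p, nxt in zip(pieces, pieces[1:]) if nxt == ']']
def clsHyp (pieces : List (List Char)) : List (List Char) :=
  ((pieces.zip pieces.tail).filter (fun pd => pd.2 == ([']'] : List Char))).map Prod.fst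

def part_1_alt (start : List String) : Int :=
  start.foldl (fun count line =>
    let pieces := bsplit line.toList
    if (clsSup pieces).any abbaB && !((clsHyp pieces).any abbaB) then count + 1
    else count) 0

-- ===== PRECONDITION & SPEC =====
def Spec_part_1 (start : List String) (out : Int) : Prop := out = part_1_alt start
instance (start : List String) (out : Int) : Decidable (Spec_part_1 start out) := by unfold Spec_part_1; infer_instance

-- ===== CLAIM (what is proved, stated in full; the proofs are below) =====
def Claim_equal_part_1 : Prop := ∀ (start : List String), Dom_part_1 start → Spec_part_1 start (part_1 start)

-- ===== LEMMAS AND PROOFS =====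

-- reference splitter: recursion on the remaining input with the pending `current`
def spl : List Char → List Char → List (List Char) × List (List Char)
  | cur, [] => ([cur], [])
  | cur, c :: l =>
    if c = '[' then
      ((if cur ≠ [] then cur :: (spl [] l).1 else (spl [] l).1), (spl [] l).2)
    else if c = ']' then
      ((spl [] l).1, cur :: (spl [] l).2)
    else spl (cur ++ [c]) l

lemma foldA (l : List Char) : ∀ (sh shn : List (List Char)) (cur : List Char),
    (l.foldl pvSplitStep (sh, shn, cur)).1 ++ [(l.foldl pvSplitStep (sh, shn, cur)).2.2]
      = sh ++ (spl cur l).1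
    ∧ (l.foldl pvSplitStep (sh, shn, cur)).2.1 = shn ++ (spl cur l).2 := by
  induction l with
  | nil => intro sh shn cur; simp [spl]
  | cons c l ih =>
    intro sh shn cur
    by_cases h1 : c = '['
    · subst h1
      simp only [List.foldl_cons, pvSplitStep, spl]
      have : ('[' : Char) = ']' ↔ False := by simp
      by_cases h2 : cur = []
      · simpa [h2] using ih sh shn []
      · have := ih (sh ++ [cur]) shn []
        simpa [h2, List.append_assoc] using this
    · by_cases h3 : c = ']'
      · subst h3
        have hne : (']' : Char) ≠ '[' := by decide
        simp only [List.foldl_cons, pvSplitStep, spl]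
        have := ih sh (shn ++ [(cur ++ [']']).dropLast]) []
        simpa [List.dropLast_concat, List.append_assoc] using this
      · simp only [List.foldl_cons, pvSplitStep, if_neg h1, if_neg h3, spl]
        exact ih sh shn (cur ++ [c])

-- head of bsplit is a bracket-free segment
lemma bsplit_head (l : List Char) :
    ∃ s rest, bsplit l = s :: rest ∧ '[' ∉ s ∧ ']' ∉ s := by
  induction l with
  | nil => exact ⟨[], [[]].tail, by simp [bsplit], by simp, by simp⟩
  | cons c l ih =>
    by_cases h : c = '[' ∨ c = ']'
    · exact ⟨[], [c] :: bsplit l, by simp [bsplit, h], by simp, by simp⟩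
    · obtain ⟨s, rest, he, h1, h2⟩ := ih
      rw [not_or] at h
      exact ⟨c :: s, rest, by simp [bsplit, h.1, h.2, he],
        by simp [Ne.symm h.1, h1], by simp [Ne.symm h.2, h2]⟩

-- prepend `cur` to the first segment of a pieces list
def mapHd (cur : List Char) : List (List Char) → List (List Char)
  | [] => []
  | s :: r => (cur ++ s) :: r

lemma mapHd_nil_arg (p : List (List Char)) : mapHd [] p = p := by
  cases p <;> simp [mapHd]

lemma lastD_cons_cons {α : Type} (a b : α) (t : List α) (d : α) :
    PySem.List.pyGetD (a :: b :: t) (-1) d = PySem.List.pyGetD (b :: t) (-1) d := by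
  rw [PySem.List.pyGetD_neg_one (a :: b :: t) d (by simp),
      PySem.List.pyGetD_neg_one (b :: t) d (by simp)]
  exact List.getLast_cons (by simp)

lemma cls_bsplit (l : List Char) : ∀ cur : List Char,
    clsSup (mapHd cur (bsplit l)) = (spl cur l).1
    ∧ clsHyp (mapHd cur (bsplit l)) = (spl cur l).2 := by
  induction l with
  | nil =>
    intro cur
    simp [bsplit, mapHd, clsSup, clsHyp, spl, PySem.List.pyGetD_neg_one [cur] [] (by simp)]
  | cons c l ih =>
    intro cur
    obtain ⟨s, rest, he, hs1, hs2⟩ := bsplit_head l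
    have hslb : (s == (['['] : List Char)) = false := by
      cases s with
      | nil => simp
      | cons a t => simp; intro ha; subst ha; exact fun _ => hs1 (by simp)
    have hsrb : (s == ([']'] : List Char)) = false := by
      cases s with
      | nil => simp
      | cons a t => simp; intro ha; subst ha; exact fun _ => hs2 (by simp)
    have ihn := ih []
    rw [mapHd_nil_arg] at ihn
    by_cases h1 : c = '['
    · subst h1
      have hb : bsplit ('[' :: l) = [] :: ['['] :: bsplit l := by simp [bsplit]
      constructor
      · simp only [hb, mapHd, List.append_nil, spl]
        rw [← ihn.1]
        simp only [clsSup, he, List.zip_cons_cons, List.tail_cons, List.filter_cons]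
        by_cases hc : cur = []
        · simp [hc, hslb, lastD_cons_cons]
        · simp [hc, hslb, lastD_cons_cons]
      · simp only [hb, mapHd, List.append_nil, spl]
        rw [← ihn.2]
        simp [clsHyp, he, hsrb]
    · by_cases h2 : c = ']'
      · subst h2
        have hb : bsplit (']' :: l) = [] :: [']'] :: bsplit l := by simp [bsplit]
        have hne : (']' : Char) ≠ '[' := by decide
        constructor
        · simp only [hb, mapHd, List.append_nil, spl, if_neg hne]
          rw [← ihn.1]
          simp [clsSup, he, hslb, lastD_cons_cons]
        · simp only [hb, mapHd, List.append_nil, spl, if_neg hne]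
          rw [← ihn.2]
          simp [clsHyp, he, hsrb]
      · have hb : bsplit (c :: l) = (c :: s) :: rest := by
          simp [bsplit, h1, h2, he]
        have : mapHd cur (bsplit (c :: l)) = mapHd (cur ++ [c]) (bsplit l) := by
          simp [hb, he, mapHd]
        rw [this]
        have := ih (cur ++ [c])
        simpa [spl, h1, h2] using this

lemma splitter_eq (s : List Char) :
    splitterA s = (clsSup (bsplit s), clsHyp (bsplit s)) := by
  have h1 := foldA s [] [] []
  have h2 := cls_bsplit s []
  rw [mapHd_nil_arg] at h2
  unfold splitterA
  simp only []
  rw [Prod.ext_iff]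
  refine ⟨?_, ?_⟩
  · simpa [h2.1] using h1.1
  · simpa [h2.2] using h1.2

-- shared window recursion for the ABBA test
def abbaR : List Char → Bool
  | [] => false
  | x :: t =>
    (match x, t with
     | a, b :: c :: d :: _ => (a == d) && (b == c) && !(a == b)
     | _, _ => false) || abbaR t

lemma abbaB_eq_R (l : List Char) : abbaB l = abbaR l := by
  induction l with
  | nil => rfl
  | cons a t ih =>
    match t with
    | [] => simp [abbaB, abbaR]
    | [b] => simp [abbaB, abbaR]
    | [b, c] => simp [abbaB, abbaR]
    | b :: c :: d :: t' =>
      have hstep : abbaB (a :: b :: c :: d :: t')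
          = (((a == d) && (b == c) && !(a == b)) || abbaB (b :: c :: d :: t')) := by
        simp [abbaB]
      rw [hstep, ih]
      simp [abbaR]

lemma abbaA_nat (l : List Char) :
    abbaA l = (List.range (l.length - 3)).any (fun i =>
      (l.getD i ' ' == l.getD (i + 3) ' ') && (l.getD (i + 1) ' ' == l.getD (i + 2) ' ')
      && !(l.getD i ' ' == l.getD (i + 1) ' ')) := by
  unfold abbaA
  by_cases h : 3 ≤ l.length
  · rw [show ((l.length : Int) - 3) = ((l.length - 3 : Nat) : Int) by omega,
        PySem.List.pyRange_zero_natCast, List.any_map]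
    congr 1
    funext k
    have e1 : ((k : Int) + 1) = ((k + 1 : Nat) : Int) := by push_cast; ring
    have e2 : ((k : Int) + 2) = ((k + 2 : Nat) : Int) := by push_cast; ring
    have e3 : ((k : Int) + 3) = ((k + 3 : Nat) : Int) := by push_cast; ring
    simp only [Function.comp, e1, e2, e3, PySem.List.pyGetD_natCast]
  · rw [PySem.List.pyRange_one_eq_nil (by omega)]
    rw [show l.length - 3 = 0 by omega]
    simp

lemma abbaA_eq_R (l : List Char) : abbaA l = abbaR l := by
  rw [abbaA_nat]
  induction l with
  | nil => simp [abbaR]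
  | cons a t ih =>
    rcases t with _ | ⟨b, t⟩
    · simp [abbaR]
    rcases t with _ | ⟨c, t⟩
    · simp [abbaR]
    rcases t with _ | ⟨d, t⟩
    · simp [abbaR]
    rw [show (a :: b :: c :: d :: t).length - 3 = ((b :: c :: d :: t).length - 3) + 1 from by
          simp,
        List.range_succ_eq_map, List.any_cons, List.any_map]
    have htail : (List.range ((b :: c :: d :: t).length - 3)).any
        ((fun i => ((a :: b :: c :: d :: t).getD i ' ' == (a :: b :: c :: d :: t).getD (i + 3) ' ')
          && ((a :: b :: c :: d :: t).getD (i + 1) ' ' == (a :: b :: c :: d :: t).getD (i + 2) ' ')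
          && !((a :: b :: c :: d :: t).getD i ' ' == (a :: b :: c :: d :: t).getD (i + 1) ' ')) ∘ Nat.succ)
        = abbaR (b :: c :: d :: t) := by
      rw [← ih]
      congr 1
    rw [htail]
    simp [abbaR, List.getD]

lemma abba_fun_eq : abbaA = abbaB := by
  funext l
  rw [abbaA_eq_R, abbaB_eq_R]

lemma step_fun_eq :
    (fun (result : Int) (item : String) =>
      let ss := splitterA item.toList
      let should_check := ss.1.foldl (fun ok x => if abbaA x then true else ok) false
      let shouldnt_check := ss.2.foldl (fun ok x => if abbaA x then true else ok) false
      if should_check && !shouldnt_check then result + 1 else result)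
    = (fun (count : Int) (line : String) =>
      let pieces := bsplit line.toList
      if (clsSup pieces).any abbaB && !((clsHyp pieces).any abbaB) then count + 1
      else count) := by
  funext r s
  simp only [PySem.List.foldl_if_true_eq, Bool.false_or, splitter_eq, abba_fun_eq]

-- ===== VERDICT (by name: the statement is the Claim_ definition above) =====
theorem part_1_spec : Claim_equal_part_1 := by
  intro start _
  unfold Spec_part_1 part_1 part_1_alt
  rw [step_fun_eq]
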